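-- pv_equiv track=rewrite | github.com/camp-lab-tud/arbitrary-microstructure-flow | src/apps.py | get_overlapping_frames
-- ===== SOURCE A (Python) =====
-- def get_overlapping_frames(
--     frame_columns: list[int],
--     window_size: tuple[int,int]
-- ):
--     """
--     For each frame, get indices of other frames that overlap with it (on its right side).
--
--     Args:
--         frame_columns: list of indices defining starting column position of each frame.
--         window_size: size (height and width) of each frame.
--     """
--
--     _, win_cols = window_size
--
--     def overlap_for_single_frame(
--         target_col: int,
--         frame_columns: int,
--         win_cols: int
--     ) -> list[int]:
--         # for a single frame (at `target_col`), get indices of other frames that overlap with it (on its right side)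
--         contributing_indices = []
--         for k, start_col in enumerate(frame_columns):
--
--             end_col = start_col + win_cols
--             end_target_col = target_col + win_cols
--
--             if (start_col <= end_target_col < end_col):
--                 contributing_indices.append(k)
--
--         return contributing_indices
--
--     out = [
--         overlap_for_single_frame(target_col, frame_columns, win_cols)
--         for target_col in frame_columns
--     ]
--     return out
-- ===== SOURCE B (Python) =====
-- def _bisect_right(a, x):
--     # CPython's bisect.bisect_right (A imports nothing, so written out here)
--     lo, hi = 0, len(a)
--     while lo < hi:
--         mid = (lo + hi) // 2
--         if x < a[mid]:
--             hi = mid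
--         else:
--             lo = mid + 1
--     return lo
--
--
-- def get_overlapping_frames(
--     frame_columns: list[int],
--     window_size: tuple[int, int]
-- ):
--     _, win_cols = window_size
--     pairs = sorted(enumerate(frame_columns), key=lambda p: p[1])
--     idxs = [i for i, _ in pairs]
--     cols = [c for _, c in pairs]
--     return [
--         sorted(idxs[_bisect_right(cols, t):_bisect_right(cols, t + win_cols)])
--         for t in frame_columns
--     ]
-- ===== Notes on version B (the rewrite author's own statement) =====
-- stated objective: faster
-- what changed: Replaces the per-frame linear scan (O(n^2)) by sorting (index, column) pairs once and answering each frame with a binary-search range query over the sorted columns, sorting the resulting index slice.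
import Mathlib
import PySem

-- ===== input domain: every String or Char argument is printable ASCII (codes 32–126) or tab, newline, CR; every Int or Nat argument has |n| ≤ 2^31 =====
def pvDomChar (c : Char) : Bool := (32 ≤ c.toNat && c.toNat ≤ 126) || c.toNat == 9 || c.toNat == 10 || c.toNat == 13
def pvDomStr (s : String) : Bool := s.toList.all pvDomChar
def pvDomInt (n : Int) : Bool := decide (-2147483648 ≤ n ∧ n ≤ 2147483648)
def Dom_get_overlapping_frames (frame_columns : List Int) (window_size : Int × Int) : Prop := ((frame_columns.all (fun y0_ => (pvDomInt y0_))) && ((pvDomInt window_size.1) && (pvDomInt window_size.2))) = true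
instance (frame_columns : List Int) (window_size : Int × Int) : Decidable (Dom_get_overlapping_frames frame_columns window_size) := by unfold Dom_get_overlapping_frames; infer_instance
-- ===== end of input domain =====

-- B replaces A's quadratic all-pairs scan by one sort of (index, column) pairs plus a
-- binary-search range query per frame (objective: faster, asymptotic).

-- ===== PORT A =====
-- A's inner helper `overlap_for_single_frame`, transliterated (loop over enumerate, append).
def overlap_for_single_frame (target_col : Int) (frame_columns : List Int) (win_cols : Int) : List Int :=
  (PySem.List.enumerate frame_columns).foldl
    (fun contributing_indices ksc =>
      let end_col := ksc.2 + win_cols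
      let end_target_col := target_col + win_cols
      if ksc.2 ≤ end_target_col ∧ end_target_col < end_col then
        contributing_indices ++ [ksc.1]
      else
        contributing_indices) []

def get_overlapping_frames (frame_columns : List Int) (window_size : Int × Int) : List (List Int) :=
  let win_cols := window_size.2
  frame_columns.map (fun target_col => overlap_for_single_frame target_col frame_columns win_cols)

-- ===== PORT B =====
-- Source B's hand-written `_bisect_right` is exactly CPython's bisect.bisect_right loop,
-- which is the prelude primitive PySem.List.bisectRight (exact; A imports nothing, so
-- Source B spells the loop out instead of importing bisect).
def get_overlapping_frames_alt (frame_columns : List Int) (window_size : Int × Int) : List (List Int) :=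
  let win_cols := window_size.2
  let pairs := PySem.List.sorted (PySem.List.enumerate frame_columns) (fun p => p.2)
  let idxs := pairs.map (fun p => p.1)
  let cols := pairs.map (fun p => p.2)
  frame_columns.map (fun t =>
    PySem.List.sorted
      (PySem.List.slice idxs (some ((PySem.List.bisectRight cols t : Nat) : Int))
        (some ((PySem.List.bisectRight cols (t + win_cols) : Nat) : Int)))
      (fun x => x))

-- ===== PRECONDITION & SPEC =====
def Spec_get_overlapping_frames (frame_columns : List Int) (window_size : Int × Int) (out : List (List Int)) : Prop := out = get_overlapping_frames_alt frame_columns window_size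
instance (frame_columns : List Int) (window_size : Int × Int) (out : List (List Int)) : Decidable (Spec_get_overlapping_frames frame_columns window_size out) := by unfold Spec_get_overlapping_frames; infer_instance

-- ===== CLAIM (what is proved, stated in full; the proofs are below) =====
def Claim_equal_get_overlapping_frames : Prop := ∀ (frame_columns : List Int) (window_size : Int × Int), Dom_get_overlapping_frames frame_columns window_size → Spec_get_overlapping_frames frame_columns window_size (get_overlapping_frames frame_columns window_size)

-- ===== LEMMAS AND PROOFS =====

-- If the first r elements satisfy p and the rest do not, filtering by p is taking r.
lemma pvFilterEqTake (l : List (Int × Int)) (p : Int × Int → Bool) (r : Nat) (hr : r ≤ l.length)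
    (h1 : ∀ (j : Nat) (hj : j < l.length), j < r → p l[j] = true)
    (h2 : ∀ (j : Nat) (hj : j < l.length), r ≤ j → ¬ p l[j] = true) :
    l.filter p = l.take r := by
  conv_lhs => rw [← List.take_append_drop r l]
  rw [List.filter_append, List.filter_eq_self.mpr, List.filter_eq_nil_iff.mpr, List.append_nil]
  · intro a ha
    obtain ⟨i, hi, hia⟩ := List.mem_iff_getElem.mp ha
    subst hia
    rw [List.getElem_drop]
    exact h2 (r + i) (by simp at hi; omega) (by omega)
  · intro a ha
    obtain ⟨i, hi, hia⟩ := List.mem_iff_getElem.mp ha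
    subst hia
    rw [List.getElem_take]
    exact h1 i (by simp at hi; omega) (by simp at hi; omega)

-- On a list sorted by second component, bisect_right's prefix is exactly the ≤ x filter.
lemma pvTakeBisect (pairs : List (Int × Int)) (x : Int)
    (hp : pairs.Pairwise (fun a b => a.2 ≤ b.2)) :
    pairs.filter (fun p => decide (p.2 ≤ x))
      = pairs.take (PySem.List.bisectRight (pairs.map (fun p => p.2)) x) := by
  have hcols : (pairs.map (fun p => p.2)).Pairwise (· ≤ ·) := List.pairwise_map.mpr hp
  obtain ⟨hle, h1, h2⟩ := PySem.List.bisectRight_spec (pairs.map (fun p => p.2)) x hcols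
  simp only [List.length_map] at hle
  apply pvFilterEqTake _ _ _ hle
  · intro j hj hjr
    have := h1 j (by simpa using hj) hjr
    simp only [List.getElem_map] at this
    simpa using this
  · intro j hj hjr
    have := h2 j (by simpa using hj) hjr
    simp only [List.getElem_map] at this
    simp only [decide_eq_true_eq]
    omega

lemma pvLenBisect (pairs : List (Int × Int)) (x : Int)
    (hp : pairs.Pairwise (fun a b => a.2 ≤ b.2)) :
    PySem.List.bisectRight (pairs.map (fun p => p.2)) x
      = (pairs.filter (fun p => decide (p.2 ≤ x))).length := by
  rw [pvTakeBisect pairs x hp, List.length_take]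
  have hle := (PySem.List.bisectRight_spec (pairs.map (fun p => p.2)) x (List.pairwise_map.mpr hp)).1
  simp only [List.length_map] at hle
  omega

-- On a sorted-by-snd list, dropping the ≤ x prefix leaves exactly the > x filter.
lemma pvSortedDropFilter (x : Int) : ∀ (l : List (Int × Int)),
    l.Pairwise (fun a b => a.2 ≤ b.2) →
    l.drop ((l.filter (fun p => decide (p.2 ≤ x))).length) = l.filter (fun p => decide (x < p.2))
  | [], _ => rfl
  | a :: l, hp => by
    rcases List.pairwise_cons.mp hp with ⟨ha, hl⟩
    by_cases h : a.2 ≤ x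
    · have hgt : ¬ (x < a.2) := by omega
      simp only [List.filter_cons, h, decide_true, hgt, decide_false]
      exact pvSortedDropFilter x l hl
    · have hle : (a :: l).filter (fun p => decide (p.2 ≤ x)) = [] := by
        refine List.filter_eq_nil_iff.mpr ?_
        intro b hb
        simp only [decide_eq_true_eq]
        rcases List.mem_cons.mp hb with rfl | hbl
        · omega
        · have := ha b hbl; omega
      rw [hle]
      simp only [List.length_nil, List.drop_zero]
      symm
      refine List.filter_eq_self.mpr ?_
      intro b hb
      simp only [decide_eq_true_eq]
      rcases List.mem_cons.mp hb with rfl | hbl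
      · omega
      · have := ha b hbl; omega

-- Per-target agreement: A's scan equals B's sorted binary-search slice.
lemma pvInner (fc : List Int) (w t : Int) :
    overlap_for_single_frame t fc w
      = PySem.List.sorted
          (PySem.List.slice ((PySem.List.sorted (PySem.List.enumerate fc) (fun p => p.2)).map (fun p => p.1))
            (some ((PySem.List.bisectRight ((PySem.List.sorted (PySem.List.enumerate fc) (fun p => p.2)).map (fun p => p.2)) t : Nat) : Int))
            (some ((PySem.List.bisectRight ((PySem.List.sorted (PySem.List.enumerate fc) (fun p => p.2)).map (fun p => p.2)) (t + w) : Nat) : Int)))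
          (fun x => x) := by
  set E := PySem.List.enumerate fc with hE
  set pairs := PySem.List.sorted E (fun p => p.2) with hpairs
  have hp : pairs.Pairwise (fun a b => a.2 ≤ b.2) := PySem.List.sorted_pairwise E (fun p => p.2)
  set lo := PySem.List.bisectRight (pairs.map (fun p => p.2)) t with hlo
  set hi := PySem.List.bisectRight (pairs.map (fun p => p.2)) (t + w) with hhi
  -- the shared window predicate
  set q : Int × Int → Bool := fun p => decide (t < p.2) && decide (p.2 ≤ t + w) with hq
  -- A's side is the enumerate filter
  have hA : overlap_for_single_frame t fc w = (E.filter q).map (fun p => p.1) := by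
    unfold overlap_for_single_frame
    rw [show (fun (contributing_indices : List Int) (ksc : Int × Int) =>
          let end_col := ksc.2 + w
          let end_target_col := t + w
          if ksc.2 ≤ end_target_col ∧ end_target_col < end_col then
            contributing_indices ++ [ksc.1]
          else contributing_indices)
        = (fun acc ksc => if q ksc = true then acc ++ [(fun (p : Int × Int) => p.1) ksc] else acc) from ?_]
    · rw [PySem.List.foldl_append_if, List.nil_append]
    · funext acc ksc
      simp only [hq, Bool.and_eq_true, decide_eq_true_eq]
      split_ifs with h1 h2 <;> first | rfl | omega
  -- B's slice is the pairs filter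
  have hSlice : PySem.List.slice (pairs.map (fun p => p.1)) (some (lo : Int)) (some (hi : Int))
      = (pairs.filter q).map (fun p => p.1) := by
    rw [PySem.List.slice_natCast, ← List.map_drop, ← List.map_take, ← List.drop_take]
    congr 1
    by_cases hw : 0 ≤ w
    · have htake : pairs.take hi = pairs.filter (fun p => decide (p.2 ≤ t + w)) :=
        (pvTakeBisect pairs (t + w) hp).symm
      rw [htake]
      have hlo' : lo = ((pairs.filter (fun p => decide (p.2 ≤ t + w))).filter
          (fun p => decide (p.2 ≤ t))).length := by
        rw [hlo, pvLenBisect pairs t hp]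
        congr 1
        rw [List.filter_filter]
        refine (List.filter_congr ?_).symm
        intro p _
        rw [← Bool.decide_and, decide_eq_decide]
        omega
      rw [hlo', pvSortedDropFilter t _ (hp.filter _), List.filter_filter]
    · -- empty window: hi ≤ lo, both sides empty
      have hmono : hi ≤ lo := by
        rw [hlo, hhi, pvLenBisect pairs t hp, pvLenBisect pairs (t + w) hp]
        rw [← List.countP_eq_length_filter, ← List.countP_eq_length_filter]
        refine List.countP_mono_left ?_
        intro p _ h
        simp only [decide_eq_true_eq] at h ⊢
        omega
      have hnil : pairs.filter q = [] := by
        refine List.filter_eq_nil_iff.mpr ?_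
        intro p _
        simp only [hq, Bool.and_eq_true, decide_eq_true_eq]
        omega
      rw [hnil]
      apply List.drop_eq_nil_of_le
      rw [List.length_take]
      omega
  -- combine: A's list is a strictly increasing rearrangement of B's slice
  rw [hSlice, hA]
  symm
  apply PySem.List.sorted_eq_of_perm_of_pairwise_lt
  · exact List.Perm.map _ (List.Perm.filter q (PySem.List.sorted_perm E (fun p => p.2) false).symm)
  · have := (PySem.List.pairwise_lt_enumerate fc 0).filter q
    exact List.pairwise_map.mpr this

-- ===== VERDICT (by name: the statement is the Claim_ definition above) =====
theorem get_overlapping_frames_spec : Claim_equal_get_overlapping_frames := by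
  intro fc ws _
  unfold Spec_get_overlapping_frames get_overlapping_frames get_overlapping_frames_alt
  simp only
  refine List.map_congr_left ?_
  intro t _
  exact pvInner fc ws.2 t
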